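-- pv_equiv track=rewrite | github.com/k-roy/TRACE | trace_crispr/utils/sequence.py | generate_edit_kmers
-- ===== SOURCE A (Python) =====
-- from typing import List, Set, Tuple
--
-- def reverse_complement(seq: str) -> str:
--     """Return reverse complement of DNA sequence."""
--     complement = {
--         'A': 'T', 'T': 'A', 'G': 'C', 'C': 'G', 'N': 'N',
--         'a': 't', 't': 'a', 'g': 'c', 'c': 'g', 'n': 'n'
--     }
--     return ''.join(complement.get(base, 'N') for base in reversed(seq))
--
-- def generate_kmers_spanning_position(
--     sequence: str,
--     position: int,
--     kmer_size: int = 12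
-- ) -> List[Tuple[str, int]]:
--     """Generate all k-mers that span a specific position.
--
--     Args:
--         sequence: DNA sequence
--         position: Position that must be covered by the k-mer
--         kmer_size: Size of k-mers to generate
--
--     Returns:
--         List of (kmer, start_position) tuples
--     """
--     kmers = []
--     seq_len = len(sequence)
--
--     # K-mer must contain position, so start can range from
--     # position - kmer_size + 1 to position
--     start_min = max(0, position - kmer_size + 1)
--     start_max = min(position, seq_len - kmer_size)
--
--     for start in range(start_min, start_max + 1):
--         kmer = sequence[start:start + kmer_size]
--         if len(kmer) == kmer_size:
--             kmers.append((kmer.upper(), start))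
--
--     return kmers
--
-- def generate_edit_kmers(
--     reference: str,
--     hdr_template: str,
--     edit_positions: List[int],
--     kmer_size: int = 12
-- ) -> Tuple[Set[str], Set[str]]:
--     """Generate WT and HDR k-mers spanning edit positions.
--
--     Args:
--         reference: Wild-type reference sequence
--         hdr_template: HDR template sequence (same length as reference)
--         edit_positions: List of positions where edits occur
--         kmer_size: Size of k-mers to generate
--
--     Returns:
--         Tuple of (wt_kmers, hdr_kmers) sets including reverse complements
--     """
--     wt_kmers = set()
--     hdr_kmers = set()
--
--     for pos in edit_positions:
--         # Generate WT k-mers from reference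
--         for kmer, _ in generate_kmers_spanning_position(reference, pos, kmer_size):
--             wt_kmers.add(kmer)
--             wt_kmers.add(reverse_complement(kmer))
--
--         # Generate HDR k-mers from template
--         for kmer, _ in generate_kmers_spanning_position(hdr_template, pos, kmer_size):
--             hdr_kmers.add(kmer)
--             hdr_kmers.add(reverse_complement(kmer))
--
--     return wt_kmers, hdr_kmers
-- ===== SOURCE B (Python) =====
-- def generate_edit_kmers(reference, hdr_template, edit_positions, kmer_size=12):
--     complement = {
--         'A': 'T', 'T': 'A', 'G': 'C', 'C': 'G', 'N': 'N',
--         'a': 't', 't': 'a', 'g': 'c', 'c': 'g', 'n': 'n'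
--     }
--
--     def kmer_set(seq):
--         # Complement the WHOLE uppercased sequence once; then every k-mer and
--         # every reverse-complement k-mer is just a slice of fwd resp. rev:
--         # reverse_complement(fwd[s:s+k]) == rev[n-s-k:n-s].
--         n = len(seq)
--         fwd = seq.upper()
--         rev = ''.join(complement.get(c, 'N') for c in fwd)[::-1]
--         return set(x
--                    for pos in edit_positions
--                    for s in range(max(0, pos - kmer_size + 1),
--                                   min(pos, n - kmer_size) + 1)
--                    for x in (fwd[s:s + kmer_size], rev[n - s - kmer_size:n - s]))
--
--     return kmer_set(reference), kmer_set(hdr_template)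
-- ===== Notes on version B (the rewrite author's own statement) =====
-- stated objective: alternative
-- what changed: B never reverse-complements a k-mer: per sequence it precomputes the uppercased string and its whole-sequence reverse complement once, reads every k-mer and every reverse-complement k-mer as plain slices of those two strings (rc(seq[s:s+k]) = rc(seq)[n-s-k:n-s]), generates them in one flat comprehension and dedups once with set(), replacing A's per-position (kmer,start) helper, per-k-mer char-by-char complementation and incremental set.add.
import Mathlib
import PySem

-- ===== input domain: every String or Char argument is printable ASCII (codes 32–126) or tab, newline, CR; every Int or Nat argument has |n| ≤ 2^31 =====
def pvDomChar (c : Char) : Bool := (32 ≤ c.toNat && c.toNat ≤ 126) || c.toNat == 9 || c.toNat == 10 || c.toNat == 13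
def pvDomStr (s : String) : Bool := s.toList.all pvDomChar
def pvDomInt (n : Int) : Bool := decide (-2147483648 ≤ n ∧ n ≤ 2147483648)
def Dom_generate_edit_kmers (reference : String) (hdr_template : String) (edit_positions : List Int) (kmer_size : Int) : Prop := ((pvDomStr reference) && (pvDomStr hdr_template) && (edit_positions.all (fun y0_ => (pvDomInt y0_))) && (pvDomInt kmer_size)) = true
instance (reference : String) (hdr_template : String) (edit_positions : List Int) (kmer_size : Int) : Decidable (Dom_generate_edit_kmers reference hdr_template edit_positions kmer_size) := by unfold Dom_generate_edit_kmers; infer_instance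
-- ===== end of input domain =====

-- B never reverse-complements a k-mer: per sequence it complements the uppercased string
-- once as a whole, reads every k-mer and its reverse complement as slices of the two
-- precomputed strings, and dedups once with set() (objective: alternative).

-- ===== PORT A =====
-- the module-level complement table (A's reverse_complement; B reuses the same table once per sequence)
def pvComplement : PySem.Dict Char Char :=
  PySem.Dict.ofList [('A','T'), ('T','A'), ('G','C'), ('C','G'), ('N','N'),
   ('a','t'), ('t','a'), ('g','c'), ('c','g'), ('n','n')]

def reverse_complement (seq : String) : String :=
  String.ofList (seq.toList.reverse.map (fun base => PySem.Dict.getD pvComplement base 'N'))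

def generate_kmers_spanning_position (sequence : String) (position : Int) (kmer_size : Int) : List (String × Int) :=
  let seq_len : Int := PySem.Str.len sequence
  let start_min : Int := max 0 (position - kmer_size + 1)
  let start_max : Int := min position (seq_len - kmer_size)
  (PySem.List.pyRange start_min (start_max + 1) 1).foldl
    (fun kmers start =>
      let kmer := PySem.Str.slice sequence (some start) (some (start + kmer_size))
      if PySem.Str.len kmer = kmer_size then kmers ++ [(PySem.Str.upper kmer, start)] else kmers)
    []

def generate_edit_kmers (reference : String) (hdr_template : String) (edit_positions : List Int) (kmer_size : Int) : List String × List String :=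
  edit_positions.foldl
    (fun (st : PySem.Set String × PySem.Set String) pos =>
      let wt := (generate_kmers_spanning_position reference pos kmer_size).foldl
        (fun w kp => PySem.Set.add (PySem.Set.add w kp.1) (reverse_complement kp.1)) st.1
      let hdr := (generate_kmers_spanning_position hdr_template pos kmer_size).foldl
        (fun h kp => PySem.Set.add (PySem.Set.add h kp.1) (reverse_complement kp.1)) st.2
      (wt, hdr))
    (PySem.Set.empty, PySem.Set.empty)

-- ===== PORT B =====
-- kmer_set(seq): fwd = seq.upper(); rev = whole-sequence complement of fwd, reversed;
-- one flat comprehension of slices of fwd and rev, dedup'd once by set(...).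
def pvKmerSetB (seq : String) (edit_positions : List Int) (kmer_size : Int) : PySem.Set String :=
  let n : Int := PySem.Str.len seq
  let fwd := PySem.Str.upper seq
  let rev := String.ofList ((fwd.toList.map (fun c => PySem.Dict.getD pvComplement c 'N')).reverse)
  PySem.Set.ofList (edit_positions.flatMap (fun pos =>
    (PySem.List.pyRange (max 0 (pos - kmer_size + 1)) (min pos (n - kmer_size) + 1) 1).flatMap (fun s =>
      [PySem.Str.slice fwd (some s) (some (s + kmer_size)),
       PySem.Str.slice rev (some (n - s - kmer_size)) (some (n - s))])))

def generate_edit_kmers_alt (reference : String) (hdr_template : String) (edit_positions : List Int) (kmer_size : Int) : List String × List String :=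
  (pvKmerSetB reference edit_positions kmer_size, pvKmerSetB hdr_template edit_positions kmer_size)

-- ===== PRECONDITION & SPEC =====
def Spec_generate_edit_kmers (reference : String) (hdr_template : String) (edit_positions : List Int) (kmer_size : Int) (out : List String × List String) : Prop := out = generate_edit_kmers_alt reference hdr_template edit_positions kmer_size
instance (reference : String) (hdr_template : String) (edit_positions : List Int) (kmer_size : Int) (out : List String × List String) : Decidable (Spec_generate_edit_kmers reference hdr_template edit_positions kmer_size out) := by unfold Spec_generate_edit_kmers; infer_instance

-- ===== CLAIM (what is proved, stated in full; the proofs are below) =====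
def Claim_equal_generate_edit_kmers : Prop := ∀ (reference : String) (hdr_template : String) (edit_positions : List Int) (kmer_size : Int), Dom_generate_edit_kmers reference hdr_template edit_positions kmer_size → Spec_generate_edit_kmers reference hdr_template edit_positions kmer_size (generate_edit_kmers reference hdr_template edit_positions kmer_size)

-- ===== LEMMAS AND PROOFS =====

-- the componentwise pair fold splits into two independent folds
lemma pvPairFold {σ τ : Type} (f : σ → Int → σ) (g : τ → Int → τ) (L : List Int) (a : σ) (b : τ) :
    L.foldl (fun st pos => (f st.1 pos, g st.2 pos)) (a, b) = (L.foldl f a, L.foldl g b) := by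
  induction L generalizing a b with
  | nil => rfl
  | cons x t ih => simp [List.foldl_cons, ih]

-- every start produced by the range has a full-length slice
lemma pvLenSlice (seq : String) (pos k s : Int)
    (hs : s ∈ PySem.List.pyRange (max 0 (pos - k + 1)) (min pos (PySem.Str.len seq - k) + 1) 1) :
    PySem.Str.len (PySem.Str.slice seq (some s) (some (s + k))) = k := by
  rw [PySem.List.mem_pyRange_one] at hs
  have hn : PySem.Str.len seq = (seq.toList.length : Int) := by simp [PySem.Str.len]
  rw [hn] at hs
  have hlen : (PySem.Str.slice seq (some s) (some (s + k))).toList.length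
      = PySem.List.clampIdx seq.toList.length (s + k) - PySem.List.clampIdx seq.toList.length s := by
    rw [PySem.Str.toList_slice]
    simp [PySem.List.length_slice]
  have hc1 : PySem.List.clampIdx seq.toList.length (s + k) = (s + k).toNat := by
    unfold PySem.List.clampIdx; split_ifs <;> omega
  have hc2 : PySem.List.clampIdx seq.toList.length s = s.toNat := by
    unfold PySem.List.clampIdx; split_ifs <;> omega
  have hv : PySem.Str.len (PySem.Str.slice seq (some s) (some (s + k)))
      = ((PySem.Str.slice seq (some s) (some (s + k))).toList.length : Int) := by
    simp [PySem.Str.len]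
  rw [hv, hlen, hc1, hc2]
  omega

-- A's per-position k-mer list is the start range mapped through slice-and-upper
lemma pvGKSP_eq_map (seq : String) (pos k : Int) :
    generate_kmers_spanning_position seq pos k =
      (PySem.List.pyRange (max 0 (pos - k + 1)) (min pos (PySem.Str.len seq - k) + 1) 1).map
        (fun s => (PySem.Str.upper (PySem.Str.slice seq (some s) (some (s + k))), s)) := by
  unfold generate_kmers_spanning_position
  rw [PySem.List.foldl_congr_mem _ _
      (fun kmers start => kmers ++ [(PySem.Str.upper (PySem.Str.slice seq (some start) (some (start + k))), start)]) _
      (fun acc x hx => by rw [if_pos (pvLenSlice seq pos k x hx)])]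
  rw [PySem.List.foldl_append_singleton_eq_map]
  simp

-- uppercasing commutes with slicing (both are index-wise on the char list)
lemma pvUpSlice (seq : String) (s k : Int) (hs : 0 ≤ s) (hk : 0 ≤ k) :
    PySem.Str.upper (PySem.Str.slice seq (some s) (some (s + k)))
      = PySem.Str.slice (PySem.Str.upper seq) (some s) (some (s + k)) := by
  apply String.toList_inj.mp
  rw [PySem.Str.toList_upper, PySem.Str.toList_slice, PySem.Str.toList_slice, PySem.Str.toList_upper]
  simp only [PySem.Chars.slice]
  rw [PySem.List.slice_toNat _ hs (by omega), PySem.List.slice_toNat _ hs (by omega)]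
  simp [PySem.Chars.upper, List.map_take, List.map_drop]

-- a reversed mapped segment is a segment of the reversed mapped whole list
lemma pvRevSeg {α β : Type} (f : α → β) (L : List α) (a b : Nat) (hab : a + b ≤ L.length) :
    ((L.drop a).take b).reverse.map f
      = ((L.map f).reverse.drop (L.length - a - b)).take b := by
  rw [List.map_reverse, List.map_take, List.map_drop]
  set M := L.map f with hMdef
  have hN : M.length = L.length := List.length_map f
  have h1 : M.reverse.drop (L.length - a - b) = (M.take (a + b)).reverse := by
    rw [List.reverse_take]; congr 1; omega
  rw [h1]
  have h2 : ((M.take (a + b)).drop a).reverse = (M.take (a + b)).reverse.take b := by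
    rw [List.reverse_drop]; congr 1; simp [List.length_take]; omega
  rw [← h2, List.drop_take]
  have hb : a + b - a = b := by omega
  rw [hb]

-- the reverse complement of an in-range k-mer is a slice of the precomputed
-- reverse complement of the whole uppercased sequence
lemma pvRcSlice (seq : String) (s k : Int)
    (hs : 0 ≤ s) (hk : 0 ≤ k) (hsk : s + k ≤ (seq.toList.length : Int)) :
    reverse_complement (PySem.Str.slice (PySem.Str.upper seq) (some s) (some (s + k)))
      = PySem.Str.slice
          (String.ofList (((PySem.Str.upper seq).toList.map (fun c => PySem.Dict.getD pvComplement c 'N')).reverse))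
          (some (PySem.Str.len seq - s - k)) (some (PySem.Str.len seq - s)) := by
  have hn : PySem.Str.len seq = (seq.toList.length : Int) := by simp [PySem.Str.len]
  rw [hn]
  apply String.toList_inj.mp
  unfold reverse_complement
  rw [String.toList_ofList, PySem.Str.toList_slice, PySem.Str.toList_slice, String.toList_ofList,
      PySem.Str.toList_upper]
  simp only [PySem.Chars.slice]
  rw [PySem.List.slice_toNat _ hs (by omega), PySem.List.slice_toNat _ (by omega) (by omega)]
  have hL : (PySem.Chars.upper seq.toList).length = seq.toList.length := by
    simp [PySem.Chars.upper]
  have hrs := pvRevSeg (fun c => PySem.Dict.getD pvComplement c 'N')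
      (PySem.Chars.upper seq.toList) s.toNat
      ((s + k).toNat - s.toNat) (by rw [hL]; omega)
  rw [hrs, hL]
  have e1 : ((seq.toList.length : Int) - s).toNat - ((seq.toList.length : Int) - s - k).toNat
      = (s + k).toNat - s.toNat := by omega
  have e2 : ((seq.toList.length : Int) - s - k).toNat
      = seq.toList.length - s.toNat - ((s + k).toNat - s.toNat) := by omega
  rw [e1, e2]

-- per-sequence equality of A's nested fold and B's slice-only flat pass
lemma pvPerSeq (seq : String) (eps : List Int) (k : Int) :
    eps.foldl (fun w pos => (generate_kmers_spanning_position seq pos k).foldl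
        (fun w kp => PySem.Set.add (PySem.Set.add w kp.1) (reverse_complement kp.1)) w)
      PySem.Set.empty = pvKmerSetB seq eps k := by
  unfold pvKmerSetB
  rw [PySem.Set.ofList_eq_foldl, List.foldl_flatMap]
  refine (PySem.List.foldl_congr_mem eps _ _ _ (fun w pos _ => ?_))
  rw [pvGKSP_eq_map, List.foldl_map, List.foldl_flatMap]
  refine PySem.List.foldl_congr_mem _ _ _ _ (fun acc s hs => ?_)
  simp only [List.foldl_cons, List.foldl_nil]
  rw [PySem.List.mem_pyRange_one] at hs
  have hn : PySem.Str.len seq = (seq.toList.length : Int) := by simp [PySem.Str.len]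
  rw [hn] at hs
  have hs0 : 0 ≤ s := by omega
  have hk0 : 0 ≤ k := by omega
  have hsk : s + k ≤ (seq.toList.length : Int) := by omega
  rw [pvUpSlice seq s k hs0 hk0, pvRcSlice seq s k hs0 hk0 hsk]

-- ===== VERDICT (by name: the statement is the Claim_ definition above) =====
theorem generate_edit_kmers_spec : Claim_equal_generate_edit_kmers := by
  intro reference hdr_template edit_positions kmer_size _
  unfold Spec_generate_edit_kmers generate_edit_kmers generate_edit_kmers_alt
  rw [pvPairFold (fun w pos => (generate_kmers_spanning_position reference pos kmer_size).foldl
        (fun w kp => PySem.Set.add (PySem.Set.add w kp.1) (reverse_complement kp.1)) w)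
      (fun h pos => (generate_kmers_spanning_position hdr_template pos kmer_size).foldl
        (fun h kp => PySem.Set.add (PySem.Set.add h kp.1) (reverse_complement kp.1)) h)]
  rw [pvPerSeq, pvPerSeq]
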